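-- pv_equiv track=rewrite | github.com/devspidr/Esim-Dashboard | pricing_dashboard.py | get_diverse_color_map
-- ===== SOURCE A (Python) =====
-- DIVERSE_COLORS = [
--     '#2E86AB', '#27AE60', '#F39C12', '#8E44AD', '#16A085',
--     '#F1C40F', '#E67E22', '#1ABC9C', '#3498DB', '#D35400',
--     '#2980B9', '#17A589', '#F0B27A', '#76D7C4', '#AED6F1',
--     '#A9DFBF', '#FAD7A0', '#D7BDE2',
-- ]
--
-- VODAFONE_RED = '#DC143C'
--
-- def get_diverse_color_map(items):
--     color_map = {}
--     non_vf_idx = 0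
--     for item in sorted(items):
--         if 'Vodafone' in str(item):
--             color_map[item] = VODAFONE_RED
--         else:
--             color_map[item] = DIVERSE_COLORS[non_vf_idx % len(DIVERSE_COLORS)]
--             non_vf_idx += 1
--     return color_map
-- ===== SOURCE B (Python) =====
-- DIVERSE_COLORS = [
--     '#2E86AB', '#27AE60', '#F39C12', '#8E44AD', '#16A085',
--     '#F1C40F', '#E67E22', '#1ABC9C', '#3498DB', '#D35400',
--     '#2980B9', '#17A589', '#F0B27A', '#76D7C4', '#AED6F1',
--     '#A9DFBF', '#FAD7A0', '#D7BDE2',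
-- ]
--
-- VODAFONE_RED = '#DC143C'
--
-- def get_diverse_color_map(items):
--     # Stateless: a non-Vodafone item's palette index is its rank -- the number of
--     # non-Vodafone elements <= it -- minus 1, found by binary search (bisect_right)
--     # on the sorted non-Vodafone list; no running counter is threaded anywhere.
--     n = len(DIVERSE_COLORS)
--     srt = sorted(items)
--     nonvf = [z for z in srt if 'Vodafone' not in str(z)]
--     def rank(x):  # bisect_right: number of elements of nonvf <= x
--         lo, hi = 0, len(nonvf)
--         while lo < hi:
--             mid = (lo + hi) // 2
--             if nonvf[mid] <= x:
--                 lo = mid + 1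
--             else:
--                 hi = mid
--         return lo
--     return {x: (VODAFONE_RED if 'Vodafone' in str(x)
--                 else DIVERSE_COLORS[(rank(x) - 1) % n]) for x in srt}
-- ===== Notes on version B (the rewrite author's own statement) =====
-- stated objective: alternative
-- what changed: Replaces A's stateful single pass threading a running non-Vodafone counter by a stateless closed form: each non-Vodafone item's palette index is its rank (count of non-Vodafone elements <= it), minus 1, computed by a binary search (bisect_right) over the sorted non-Vodafone list; no counter or order-dependent state exists in B.
import Mathlib
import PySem

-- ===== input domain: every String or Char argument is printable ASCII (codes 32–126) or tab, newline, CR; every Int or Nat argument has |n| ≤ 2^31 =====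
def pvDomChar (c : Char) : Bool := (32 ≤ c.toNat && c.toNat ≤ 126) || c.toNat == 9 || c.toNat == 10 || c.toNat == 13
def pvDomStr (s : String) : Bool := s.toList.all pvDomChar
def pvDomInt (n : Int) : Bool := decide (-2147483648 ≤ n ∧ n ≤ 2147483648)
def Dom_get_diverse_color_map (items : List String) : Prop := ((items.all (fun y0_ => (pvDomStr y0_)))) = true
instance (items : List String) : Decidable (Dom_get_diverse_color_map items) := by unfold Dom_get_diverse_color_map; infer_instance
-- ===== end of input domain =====

-- B replaces A's stateful pass (running non-Vodafone counter) by a stateless closed form: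
-- each non-Vodafone item's palette index is its rank among non-Vodafone elements (found by
-- binary search on the sorted non-Vodafone list), minus 1 (objective: alternative).

def pvDiverseColors : List String := [
  "#2E86AB", "#27AE60", "#F39C12", "#8E44AD", "#16A085",
  "#F1C40F", "#E67E22", "#1ABC9C", "#3498DB", "#D35400",
  "#2980B9", "#17A589", "#F0B27A", "#76D7C4", "#AED6F1",
  "#A9DFBF", "#FAD7A0", "#D7BDE2"]

def pvVodafoneRed : String := "#DC143C"

-- 'Vodafone' in str(item)  (item is already a str, so str(item) = item)
def pvIsVF (x : String) : Bool := PySem.Str.isIn "Vodafone" x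

-- ===== PORT A =====
-- color_map = {}; non_vf_idx = 0; for item in sorted(items): …
-- The counter is a Nat (it starts at 0 and only grows, so its values coincide with Python's int);
-- DIVERSE_COLORS[non_vf_idx % len(DIVERSE_COLORS)] is ported with getD, exact because 0 ≤ i % 18 < 18.
def get_diverse_color_map (items : List String) : List (String × String) :=
  (((PySem.List.sorted items (fun x => x) false).foldl
      (fun (st : PySem.Dict String String × Nat) item =>
        if pvIsVF item then (st.1.insert item pvVodafoneRed, st.2)
        else (st.1.insert item (pvDiverseColors.getD (st.2 % pvDiverseColors.length) ""), st.2 + 1))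
      (PySem.Dict.empty, 0)).1).items

-- ===== PORT B =====
-- def rank(x): lo, hi = 0, len(nonvf); while lo < hi: …  — hand-written bisect_right.
-- lo, hi, mid are Nats (they stay in [0, len]); (lo+hi)//2 on nonnegative ints is Nat '/';
-- nonvf[mid] is ported with getD, exact because lo ≤ mid < hi ≤ len keeps mid in range.
def pvBisectLoop (l : List String) (x : String) (lo hi : Nat) : Nat :=
  if lo < hi then
    if l.getD ((lo + hi) / 2) "" ≤ x then pvBisectLoop l x ((lo + hi) / 2 + 1) hi
    else pvBisectLoop l x lo ((lo + hi) / 2)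
  else lo
termination_by hi - lo
decreasing_by all_goals omega

-- return {x: (VODAFONE_RED if 'Vodafone' in str(x) else DIVERSE_COLORS[(rank(x)-1) % n]) for x in srt}
-- rank(x) - 1 is Nat subtraction; exact because rank(x) ≥ 1 whenever it is asked for x ∈ srt.
def get_diverse_color_map_alt (items : List String) : List (String × String) :=
  let srt := PySem.List.sorted items (fun x => x) false
  let nonvf := srt.filter (fun z => !pvIsVF z)
  (srt.foldl
      (fun d x => d.insert x
        (if pvIsVF x then pvVodafoneRed
         else pvDiverseColors.getD ((pvBisectLoop nonvf x 0 nonvf.length - 1) % pvDiverseColors.length) ""))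
      PySem.Dict.empty).items

-- ===== PRECONDITION & SPEC =====
def Spec_get_diverse_color_map (items : List String) (out : List (String × String)) : Prop := out = get_diverse_color_map_alt items
instance (items : List String) (out : List (String × String)) : Decidable (Spec_get_diverse_color_map items out) := by unfold Spec_get_diverse_color_map; infer_instance

-- ===== CLAIM (what is proved, stated in full; the proofs are below) =====
def Claim_equal_get_diverse_color_map : Prop := ∀ (items : List String), Dom_get_diverse_color_map items → Spec_get_diverse_color_map items (get_diverse_color_map items)

-- ===== LEMMAS AND PROOFS =====

-- A's loop body, named for the lemmas below.
def pvStepA (st : PySem.Dict String String × Nat) (item : String) : PySem.Dict String String × Nat :=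
  if pvIsVF item then (st.1.insert item pvVodafoneRed, st.2)
  else (st.1.insert item (pvDiverseColors.getD (st.2 % pvDiverseColors.length) ""), st.2 + 1)

-- counter value at which A performs its LAST write of key x while consuming the sorted list l
def pvCnt (l : List String) (x : String) : Nat :=
  l.countP (fun z => decide (z < x) && !pvIsVF z) + l.count x - 1

lemma pvA_eq (items : List String) :
    get_diverse_color_map items
      = (((PySem.List.sorted items (fun x => x) false).foldl pvStepA (PySem.Dict.empty, 0)).1).items := rfl

-- helper used by pvMain (sorted duplicates are adjacent)
lemma pvHead_eq_of_mem {y : String} {t : List String}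
    (hp : (y :: t).Pairwise (· ≤ ·)) (hyt : y ∈ t) : ∃ t', t = y :: t' := by
  cases t with
  | nil => simp at hyt
  | cons z t' =>
    rcases List.mem_cons.1 hyt with h | h
    · exact ⟨t', by rw [h]⟩
    · have hyz : y ≤ z := (List.pairwise_cons.1 hp).1 z List.mem_cons_self
      have hzy : z ≤ y := (List.pairwise_cons.1 (List.pairwise_cons.1 hp).2).1 y h
      exact ⟨t', by rw [le_antisymm hzy hyz]⟩

lemma pvMain (n : Nat) : ∀ (l : List String), l.length ≤ n → l.Pairwise (· ≤ ·) →
    ∀ (f : String → String) (d : PySem.Dict String String) (k : Nat),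
    (∀ x ∈ l, pvIsVF x = false →
        f x = pvDiverseColors.getD ((k + pvCnt l x) % pvDiverseColors.length) "") →
    (l.foldl pvStepA (d, k)).1
      = l.foldl (fun d x => d.insert x (if pvIsVF x then pvVodafoneRed else f x)) d := by
  induction n with
  | zero =>
    intro l hl _ f d k _
    have : l = [] := List.length_eq_zero_iff.1 (Nat.le_zero.1 hl)
    subst this; rfl
  | succ n IH =>
    intro l hl hp f d k Hc
    cases l with
    | nil => rfl
    | cons y t =>
      have hyt : ∀ z ∈ t, y ≤ z := (List.pairwise_cons.1 hp).1
      have hpt : t.Pairwise (· ≤ ·) := (List.pairwise_cons.1 hp).2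
      by_cases hmem : y ∈ t
      · -- sorted duplicates are adjacent: the first write of y is immediately overwritten
        obtain ⟨t', rfl⟩ := pvHead_eq_of_mem hp hmem
        have e2 : ∀ d', ((d' : PySem.Dict String String).insert y
              (if pvIsVF y then pvVodafoneRed else f y)).insert y
              (if pvIsVF y then pvVodafoneRed else f y)
            = d'.insert y (if pvIsVF y then pvVodafoneRed else f y) := by
          intro d'; simp [PySem.Dict.insert_insert_self]
        by_cases hv : pvIsVF y
        · have e1 : pvStepA (pvStepA (d, k) y) y = pvStepA (d, k) y := by
            simp [pvStepA, hv, PySem.Dict.insert_insert_self]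
          simp only [List.foldl_cons]
          rw [e1, e2]
          rw [← List.foldl_cons (f := pvStepA),
              ← List.foldl_cons (f := fun d x => PySem.Dict.insert d x (if pvIsVF x then pvVodafoneRed else f x))]
          apply IH (y :: t') (by simpa using Nat.le_of_succ_le_succ (by simpa using hl)) hpt
          intro x hx hvx
          have := Hc x (List.mem_cons_of_mem _ hx) hvx
          rw [this]
          congr 2
          have hxy : x ≠ y := fun he => by rw [he, hv] at hvx; cases hvx
          simp only [pvCnt, List.countP_cons, List.count_cons, hv]
          simp [Ne.symm hxy]
        · have e1 : pvStepA (pvStepA (d, k) y) y = pvStepA (d, k + 1) y := by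
            simp [pvStepA, hv, PySem.Dict.insert_insert_self]
          simp only [List.foldl_cons]
          rw [e1, e2]
          rw [← List.foldl_cons (f := pvStepA),
              ← List.foldl_cons (f := fun d x => PySem.Dict.insert d x (if pvIsVF x then pvVodafoneRed else f x))]
          apply IH (y :: t') (by simpa using Nat.le_of_succ_le_succ (by simpa using hl)) hpt
          intro x hx hvx
          have := Hc x (List.mem_cons_of_mem _ hx) hvx
          rw [this]
          congr 2
          by_cases hxy : x = y
          · subst hxy
            simp only [pvCnt, List.countP_cons, List.count_cons, hv]
            simp
            omega
          · have hxt' : x ∈ t' := (List.mem_cons.1 hx).resolve_left hxy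
            have hlt : y < x := lt_of_le_of_ne (hyt x hx) (Ne.symm hxy)
            have hc1 : 0 < t'.count x := List.count_pos_iff.2 hxt'
            simp only [pvCnt, List.countP_cons, List.count_cons, hv]
            simp [hlt, Ne.symm hxy]
            omega
      · -- y occurs once: A's counter at this (last) write matches the closed form
        by_cases hv : pvIsVF y
        · simp only [List.foldl_cons]
          have eA : pvStepA (d, k) y = (d.insert y pvVodafoneRed, k) := by simp [pvStepA, hv]
          rw [eA, if_pos hv]
          apply IH t (by simpa using Nat.le_of_succ_le_succ (by simpa using hl)) hpt
          intro x hx hvx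
          have := Hc x (List.mem_cons_of_mem _ hx) hvx
          rw [this]
          congr 2
          have hxy : x ≠ y := fun he => hmem (he ▸ hx)
          simp only [pvCnt, List.countP_cons, List.count_cons, hv]
          simp [Ne.symm hxy]
        · simp only [List.foldl_cons]
          have hcy : f y = pvDiverseColors.getD (k % pvDiverseColors.length) "" := by
            rw [Hc y List.mem_cons_self (by simpa using hv)]
            congr 2
            have hcp : t.countP (fun z => decide (z < y) && !pvIsVF z) = 0 := by
              rw [List.countP_eq_zero]
              intro z hz
              simp [not_lt.2 (hyt z hz)]
            have hc0 : t.count y = 0 := List.count_eq_zero.2 hmem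
            simp only [pvCnt, List.countP_cons, List.count_cons, hcp, hc0]
            simp
          have eA : pvStepA (d, k) y
              = (d.insert y (pvDiverseColors.getD (k % pvDiverseColors.length) ""), k + 1) := by
            simp [pvStepA, hv]
          rw [eA, if_neg (by simp [hv]), hcy]
          apply IH t (by simpa using Nat.le_of_succ_le_succ (by simpa using hl)) hpt
          intro x hx hvx
          have := Hc x (List.mem_cons_of_mem _ hx) hvx
          rw [this]
          congr 2
          have hxy : x ≠ y := fun he => hmem (he ▸ hx)
          have hlt : y < x := lt_of_le_of_ne (hyt x hx) (Ne.symm hxy)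
          have hc1 : 0 < t.count x := List.count_pos_iff.2 hx
          simp only [pvCnt, List.countP_cons, List.count_cons, hv]
          simp [hlt, Ne.symm hxy]
          omega

-- splitting the ≤-count into the <-count plus the equal-count (x itself non-Vodafone)
lemma pvRank_split (l : List String) (x : String) (hvx : pvIsVF x = false) :
    l.countP (fun z => !pvIsVF z && decide (z ≤ x))
      = l.countP (fun z => decide (z < x) && !pvIsVF z) + l.count x := by
  induction l with
  | nil => rfl
  | cons y t ih =>
    simp only [List.countP_cons, List.count_cons]
    rw [ih]
    by_cases hxy : y = x
    · subst hxy; simp [hvx]; omega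
    · by_cases hlt : y < x
      · simp [hlt, le_of_lt hlt, hxy]; split_ifs <;> omega
      · have : ¬ y ≤ x := fun hle => hlt (lt_of_le_of_ne hle hxy)
        simp [hlt, this, hxy]

-- the binary search maintains its boundary invariants
lemma pvBisectLoop_spec (l : List String) (x : String) (hs : l.Pairwise (· ≤ ·)) :
    ∀ (fuel lo hi : Nat), hi - lo ≤ fuel → lo ≤ hi → hi ≤ l.length →
    (∀ j (hj : j < l.length), j < lo → l[j] ≤ x) →
    (∀ j (hj : j < l.length), hi ≤ j → x < l[j]) →
    pvBisectLoop l x lo hi ≤ l.length ∧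
    (∀ j (hj : j < l.length), j < pvBisectLoop l x lo hi → l[j] ≤ x) ∧
    (∀ j (hj : j < l.length), pvBisectLoop l x lo hi ≤ j → x < l[j]) := by
  intro fuel
  induction fuel with
  | zero =>
    intro lo hi hf hlh hhl h1 h2
    have : lo = hi := by omega
    subst this
    rw [pvBisectLoop, if_neg (lt_irrefl _)]
    exact ⟨by omega, h1, h2⟩
  | succ n ih =>
    intro lo hi hf hlh hhl h1 h2
    rw [pvBisectLoop]
    by_cases h : lo < hi
    · rw [if_pos h]
      have hmid : (lo + hi) / 2 < l.length := by omega
      rw [List.getD_eq_getElem l "" hmid]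
      by_cases hle : l[(lo + hi) / 2] ≤ x
      · rw [if_pos hle]
        apply ih _ _ (by omega) (by omega) hhl _ h2
        intro j hj hjlt
        rcases Nat.lt_or_ge j ((lo + hi) / 2) with hc | hc
        · exact le_trans ((List.pairwise_iff_getElem.1 hs) j _ hj hmid hc) hle
        · have : j = (lo + hi) / 2 := by omega
          subst this; exact hle
      · rw [if_neg hle]
        apply ih _ _ (by omega) (by omega) (by omega) h1
        intro j hj hjge
        rcases Nat.lt_or_ge ((lo + hi) / 2) j with hc | hc
        · exact lt_of_lt_of_le (lt_of_not_ge hle) ((List.pairwise_iff_getElem.1 hs) _ j hmid hj hc)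
        · have : j = (lo + hi) / 2 := by omega
          subst this; exact lt_of_not_ge hle
    · rw [if_neg h]
      have : lo = hi := by omega
      subst this
      exact ⟨by omega, h1, h2⟩

-- a split point with those boundary properties IS the count of elements ≤ x
lemma pvCount_of_split (l : List String) (x : String) (r : Nat) (hr : r ≤ l.length)
    (h1 : ∀ j (hj : j < l.length), j < r → l[j] ≤ x)
    (h2 : ∀ j (hj : j < l.length), r ≤ j → x < l[j]) :
    l.countP (fun z => decide (z ≤ x)) = r := by
  conv_lhs => rw [← List.take_append_drop r l]
  rw [List.countP_append]
  have ht : (l.take r).countP (fun z => decide (z ≤ x)) = (l.take r).length := by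
    rw [List.countP_eq_length]
    intro a ha
    obtain ⟨i, hi, hieq⟩ := List.getElem_of_mem ha
    have hil : i < l.length := by
      have := hi; rw [List.length_take] at this; omega
    have : a = l[i] := by rw [← hieq, List.getElem_take]
    subst this
    have : i < r := by have := hi; rw [List.length_take] at this; omega
    simpa using h1 i hil this
  have hd : (l.drop r).countP (fun z => decide (z ≤ x)) = 0 := by
    rw [List.countP_eq_zero]
    intro a ha
    obtain ⟨i, hi, hieq⟩ := List.getElem_of_mem ha
    rw [List.getElem_drop] at hieq
    have hil : r + i < l.length := by have := hi; rw [List.length_drop] at this; omega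
    have : a = l[r + i] := by rw [← hieq]
    subst this
    simpa using not_le.2 (h2 (r + i) hil (by omega))
  rw [ht, hd, List.length_take]
  omega

-- on a sorted list, the binary search computes the ≤-count (bisect_right)
lemma pvBisect_eq_countP (l : List String) (x : String) (hs : l.Pairwise (· ≤ ·)) :
    pvBisectLoop l x 0 l.length = l.countP (fun z => decide (z ≤ x)) := by
  obtain ⟨ha, hb, hc⟩ := pvBisectLoop_spec l x hs l.length 0 l.length (by omega) (by omega) le_rfl
    (by omega) (by omega)
  exact (pvCount_of_split l x _ ha hb hc).symm

-- B's fold, with the let-bindings spelled out (definitional)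
lemma pvB_eq (items : List String) :
    get_diverse_color_map_alt items
      = ((PySem.List.sorted items (fun x => x) false).foldl
          (fun d x => d.insert x
            (if pvIsVF x then pvVodafoneRed
             else pvDiverseColors.getD
               ((pvBisectLoop ((PySem.List.sorted items (fun x => x) false).filter (fun z => !pvIsVF z)) x 0
                   ((PySem.List.sorted items (fun x => x) false).filter (fun z => !pvIsVF z)).length - 1)
                 % pvDiverseColors.length) ""))
          PySem.Dict.empty).items := rfl

-- ===== VERDICT (by name: the statement is the Claim_ definition above) =====
theorem get_diverse_color_map_spec : Claim_equal_get_diverse_color_map := by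
  intro items _
  unfold Spec_get_diverse_color_map
  rw [pvA_eq, pvB_eq]
  have hp : (PySem.List.sorted items (fun x => x) false).Pairwise (· ≤ ·) :=
    PySem.List.sorted_pairwise items (fun x => x)
  congr 1
  apply pvMain (PySem.List.sorted items (fun x => x) false).length
    (PySem.List.sorted items (fun x => x) false) le_rfl hp
    (fun x => pvDiverseColors.getD
      ((pvBisectLoop ((PySem.List.sorted items (fun x => x) false).filter (fun z => !pvIsVF z)) x 0
          ((PySem.List.sorted items (fun x => x) false).filter (fun z => !pvIsVF z)).length - 1)
        % pvDiverseColors.length) "")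
    PySem.Dict.empty 0
  intro x hx hvx
  set srt := PySem.List.sorted items (fun x => x) false with hsrt
  have hnvs : (srt.filter (fun z => !pvIsVF z)).Pairwise (· ≤ ·) := hp.filter _
  rw [pvBisect_eq_countP _ x hnvs, List.countP_filter]
  have hsplit := pvRank_split srt x hvx
  simp only [Bool.and_comm] at hsplit ⊢
  rw [hsplit]
  have hcount : 0 < srt.count x := List.count_pos_iff.2 hx
  unfold pvCnt
  congr 2
  simp only [Bool.and_comm]
  omega
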